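-- pv_equiv track=rewrite | github.com/mavdian14/Portfolio | Problem Solving/Recursion/Stone Division, Revisited.py | stoneDivision
-- ===== SOURCE A (Python) =====
-- import collections
--
-- def stoneDivision(n, s):
--     dp = collections.defaultdict(lambda: None)
--     dp[1]=0
--     def find(x):
--         if dp[x] is None:
--             mxx=0
--             for i in s:
--                 if x!=i and x%i==0:
--                     mx=1+(x//i)*find(i)
--                     mxx=max(mxx,mx)
--             dp[x]=mxx
--         return dp[x]
--     return find(n)
-- ===== SOURCE B (Python) =====
-- def stoneDivision(n, s):
--     # Bottom-up DP: tabulate the optimal move count for every distinct divisor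
--     # of n occurring in s, in order of increasing absolute value, then read off
--     # the answer for n from the table (no recursion).
--     def best(x, dp):
--         return max([0] + [1 + (x // i) * dp[i] for i in s if x != i and x % i == 0])
--     if n == 1:
--         return 0
--     dp = {1: 0}
--     for v in sorted((x for x in set(s) if x != 1 and x != n and n % x == 0), key=abs):
--         dp[v] = best(v, dp)
--     return best(n, dp)
-- ===== Notes on version B (the rewrite author's own statement) =====
-- stated objective: alternative
-- what changed: Replaces the memoized top-down recursion (nested find threading a dict) by an iterative bottom-up DP: the distinct divisors of n occurring in s are tabulated in order of increasing absolute value and the answer for n is then read off the table, with no recursion at all.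
import Mathlib
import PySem

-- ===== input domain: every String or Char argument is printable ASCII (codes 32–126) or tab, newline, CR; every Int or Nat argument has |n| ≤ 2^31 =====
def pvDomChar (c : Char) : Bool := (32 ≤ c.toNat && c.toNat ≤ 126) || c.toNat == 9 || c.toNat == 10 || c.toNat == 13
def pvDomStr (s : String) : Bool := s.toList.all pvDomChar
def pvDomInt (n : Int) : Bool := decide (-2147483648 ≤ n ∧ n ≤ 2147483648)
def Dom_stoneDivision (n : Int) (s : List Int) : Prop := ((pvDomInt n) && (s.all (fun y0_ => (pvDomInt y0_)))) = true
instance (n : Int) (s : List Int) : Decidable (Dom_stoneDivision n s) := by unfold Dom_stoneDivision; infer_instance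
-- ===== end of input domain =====

-- B replaces A's memoized top-down recursion by an iterative bottom-up DP table over the divisors of n in s (objective: alternative, not timed faster).

-- ===== PORT A =====
-- find(x): memoized recursion; the dict dp is threaded through; the fuel argument only
-- bounds the recursion depth (inside Pre_ the depth is below 2*Σ|s_i|+4, so fuel never runs out).
def findA (s : List Int) : Nat → Int → PySem.Dict Int Int → Int × PySem.Dict Int Int
  | 0, _, dp => (0, dp)
  | f+1, x, dp =>
    match PySem.Dict.get? dp x with
    | some v => (v, dp)
    | none =>
      let r := s.foldl (fun (acc : Int × PySem.Dict Int Int) i =>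
          if x ≠ i ∧ PySem.Int.mod x i = 0 then
            let t := findA s f i acc.2
            (max acc.1 (1 + PySem.Int.floordiv x i * t.1), t.2)
          else acc) (0, dp)
      (r.1, PySem.Dict.insert r.2 x r.1)

def stoneDivision (n : Int) (s : List Int) : Int :=
  (findA s (2 * (s.map Int.natAbs).sum + 4) n
    (PySem.Dict.insert PySem.Dict.empty 1 0)).1

-- ===== PORT B =====
-- best(x, dp) = max([0] + [1 + (x//i)*dp[i] for i in s if x != i and x % i == 0]);
-- dp[i] in Source B is a raising lookup — inside Pre_ it is always a hit, so the getD 0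
-- default is never taken there.
def bestB (s : List Int) (x : Int) (dp : PySem.Dict Int Int) : Int :=
  s.foldl (fun acc i =>
    if x ≠ i ∧ PySem.Int.mod x i = 0 then
      max acc (1 + PySem.Int.floordiv x i * (dp.get? i).getD 0)
    else acc) 0

-- sorted((x for x in set(s) if x != 1 and x != n and n % x == 0), key=abs);
-- PySem.Int.mod n 0 is total in Lean where Python raises — inside Pre_ the x = 0 test
-- is only reached with n = 0, where Python short-circuits on x != n before n % x.
def candB (n : Int) (s : List Int) : List Int :=
  PySem.List.sorted
    ((PySem.Set.ofList s).filter (fun x => decide (x ≠ 1 ∧ x ≠ n ∧ PySem.Int.mod n x = 0)))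
    (fun v => |v|) false

def stoneDivision_alt (n : Int) (s : List Int) : Int :=
  if n = 1 then 0
  else
    let dp := (candB n s).foldl (fun dp v => dp.insert v (bestB s v dp))
      (PySem.Dict.insert PySem.Dict.empty 1 0)
    bestB s n dp

-- ===== PRECONDITION & SPEC =====
-- Pre_ excludes exactly the inputs on which A raises: with 0 ∈ s the recursion divides by
-- zero (ZeroDivisionError) as soon as any value other than 0 and the memoized 1 is expanded,
-- and an opposite pair v, -v ∈ s with |v| ≥ 2 and v ∣ n makes the recursion cycle between
-- v and -v (RecursionError); n = 1 always returns the seeded 0 and is always admitted.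
def Pre_stoneDivision (n : Int) (s : List Int) : Prop :=
  n = 1 ∨ (((0 : Int) ∈ s → n = 0 ∧ ∀ i ∈ s, i = 0 ∨ i = 1) ∧
    ∀ v ∈ s, -v ∈ s → 2 ≤ |v| → ¬ v ∣ n)
instance (n : Int) (s : List Int) : Decidable (Pre_stoneDivision n s) := by
  unfold Pre_stoneDivision; infer_instance

def pvWitness_stoneDivision : Int × List Int := (12, [1, 2, 6])

def Spec_stoneDivision (n : Int) (s : List Int) (out : Int) : Prop := out = stoneDivision_alt n s
instance (n : Int) (s : List Int) (out : Int) : Decidable (Spec_stoneDivision n s out) := by unfold Spec_stoneDivision; infer_instance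

-- ===== CLAIM (what is proved, stated in full; the proofs are below) =====
def Claim_equal_stoneDivision : Prop := ∀ (n : Int) (s : List Int), Dom_stoneDivision n s → Pre_stoneDivision n s → Spec_stoneDivision n s (stoneDivision n s)

-- ===== LEMMAS AND PROOFS =====

-- the pure (memo-free) value recursion both ports compute; fuel-indexed
def gpure (s : List Int) : Nat → Int → Int
  | 0, _ => 0
  | f+1, x =>
    if x = 1 then 0
    else s.foldl (fun acc i =>
      if x ≠ i ∧ PySem.Int.mod x i = 0 then
        max acc (1 + PySem.Int.floordiv x i * gpure s f i)
      else acc) 0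

-- the stable value (fuel 2|x|+2 suffices for x ∈ s under Pre_)
def gval (s : List Int) (x : Int) : Int := gpure s (2 * x.natAbs + 2) x

theorem gpure_one (s : List Int) (f : Nat) : gpure s f 1 = 0 := by
  cases f <;> simp [gpure]

theorem gval_one (s : List Int) : gval s 1 = 0 := gpure_one s _

theorem gpure_succ (s : List Int) (f : Nat) (x : Int) :
    gpure s (f + 1) x = if x = 1 then 0
    else s.foldl (fun acc i =>
      if x ≠ i ∧ PySem.Int.mod x i = 0 then
        max acc (1 + PySem.Int.floordiv x i * gpure s f i)
      else acc) 0 := rfl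

theorem edge_lt {n : Int} {s : List Int} (hs0 : (0 : Int) ∉ s)
    (hsp : ∀ v ∈ s, -v ∈ s → 2 ≤ |v| → ¬ v ∣ n) {x i : Int}
    (hx : x ∈ s) (hxn : x ∣ n) (hx1 : x ≠ 1) (hi : i ∈ s) (hne : x ≠ i)
    (hm : PySem.Int.mod x i = 0) (hi1 : i ≠ 1) : i.natAbs < x.natAbs := by
  have hdvd : i ∣ x := (PySem.Int.mod_eq_zero_iff_dvd x i).1 hm
  have hx0 : x ≠ 0 := fun h => hs0 (h ▸ hx)
  have hle : i.natAbs ≤ x.natAbs :=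
    Nat.le_of_dvd (Int.natAbs_pos.2 hx0) (Int.natAbs_dvd_natAbs.2 hdvd)
  rcases Nat.lt_or_ge i.natAbs x.natAbs with h | h
  · exact h
  · exfalso
    have heq : i.natAbs = x.natAbs := le_antisymm hle h
    rcases Int.natAbs_eq_natAbs_iff.1 heq with h' | h'
    · exact hne h'.symm
    · -- i = -x, both in s: the pair lemma forbids |x| ≥ 2; x ∉ {0,1} leaves x = -1, i = 1
      have hnx : -x ∈ s := by rw [← h']; exact hi
      by_cases hab : 2 ≤ |x|
      · exact hsp x hx hnx hab hxn
      · have hxm1 : x = -1 := by rw [Int.abs_eq_natAbs] at hab; omega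
        exact hi1 (by omega)

theorem gpure_mono {n : Int} {s : List Int} (hs0 : (0 : Int) ∉ s)
    (hsp : ∀ v ∈ s, -v ∈ s → 2 ≤ |v| → ¬ v ∣ n) :
    ∀ K : Nat, ∀ x ∈ s, x ∣ n → 2 * x.natAbs ≤ K → gpure s (K + 1) x = gpure s K x := by
  intro K
  induction K using Nat.strong_induction_on with
  | _ K IH =>
    intro x hx hxn hK
    by_cases hx1 : x = 1
    · subst hx1; rw [gpure_one, gpure_one]
    · have hx0 : x ≠ 0 := fun h => hs0 (h ▸ hx)
      have ha : 1 ≤ x.natAbs := Int.natAbs_pos.2 hx0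
      obtain ⟨K', rfl⟩ : ∃ K', K = K' + 1 := ⟨K - 1, by omega⟩
      show gpure s (K' + 1 + 1) x = gpure s (K' + 1) x
      rw [gpure_succ, gpure_succ, if_neg hx1, if_neg hx1]
      apply PySem.List.foldl_congr_mem'
      intro i hi acc
      by_cases hc : x ≠ i ∧ PySem.Int.mod x i = 0
      · simp only [if_pos hc]
        by_cases hi1 : i = 1
        · subst hi1; rw [gpure_one, gpure_one]
        · have hlt := edge_lt hs0 hsp hx hxn hx1 hi hc.1 hc.2 hi1
          have hin : i ∣ n := dvd_trans ((PySem.Int.mod_eq_zero_iff_dvd x i).1 hc.2) hxn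
          rw [IH K' (by omega) i hi hin (by omega)]
      · simp only [if_neg hc]

theorem gpure_stable {n : Int} {s : List Int} (hs0 : (0 : Int) ∉ s)
    (hsp : ∀ v ∈ s, -v ∈ s → 2 ≤ |v| → ¬ v ∣ n) {x : Int} (hx : x ∈ s) (hxn : x ∣ n) :
    ∀ K : Nat, 2 * x.natAbs ≤ K → gpure s K x = gval s x := by
  have aux : ∀ d : Nat, gpure s (2 * x.natAbs + d) x = gpure s (2 * x.natAbs) x := by
    intro d
    induction d with
    | zero => rfl
    | succ d IHd =>
      have : 2 * x.natAbs + (d + 1) = (2 * x.natAbs + d) + 1 := rfl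
      rw [this, gpure_mono hs0 hsp (2 * x.natAbs + d) x hx hxn (by omega), IHd]
  intro K hK
  obtain ⟨d, rfl⟩ := Nat.exists_eq_add_of_le hK
  rw [aux d, gval, ← aux 2]

theorem gval_eq {n : Int} {s : List Int} (hs0 : (0 : Int) ∉ s)
    (hsp : ∀ v ∈ s, -v ∈ s → 2 ≤ |v| → ¬ v ∣ n) {x : Int} (hx : x ∈ s) (hxn : x ∣ n)
    (hx1 : x ≠ 1) :
    gval s x = s.foldl (fun acc i =>
      if x ≠ i ∧ PySem.Int.mod x i = 0 then
        max acc (1 + PySem.Int.floordiv x i * gval s i)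
      else acc) 0 := by
  rw [gval]
  show gpure s (2 * x.natAbs + 1 + 1) x = _
  rw [gpure_succ, if_neg hx1]
  apply PySem.List.foldl_congr_mem'
  intro i hi acc
  by_cases hc : x ≠ i ∧ PySem.Int.mod x i = 0
  · simp only [if_pos hc]
    by_cases hi1 : i = 1
    · subst hi1; rw [gpure_one, gval_one]
    · have hlt := edge_lt hs0 hsp hx hxn hx1 hi hc.1 hc.2 hi1
      have hin : i ∣ n := dvd_trans ((PySem.Int.mod_eq_zero_iff_dvd x i).1 hc.2) hxn
      rw [gpure_stable hs0 hsp hi hin (2 * x.natAbs + 1) (by omega)]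
  · simp only [if_neg hc]

-- memo-dict invariant shared by both ports: 1 ↦ 0 is present, every entry is a gval
def okDict (s : List Int) (dp : PySem.Dict Int Int) : Prop :=
  dp.get? 1 = some 0 ∧ ∀ k w, dp.get? k = some w → w = gval s k

theorem findA_one {s : List Int} (f : Nat) (dp : PySem.Dict Int Int)
    (h1 : dp.get? 1 = some 0) : findA s f 1 dp = (0, dp) := by
  cases f with
  | zero => rfl
  | succ f => simp [findA, h1]

theorem findA_miss {s : List Int} {f : Nat} {x : Int} {dp : PySem.Dict Int Int}
    (h : PySem.Dict.get? dp x = none) :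
    findA s (f + 1) x dp =
      ((s.foldl (fun (acc : Int × PySem.Dict Int Int) i =>
          if x ≠ i ∧ PySem.Int.mod x i = 0 then
            let u := findA s f i acc.2
            (max acc.1 (1 + PySem.Int.floordiv x i * u.1), u.2)
          else acc) (0, dp)).1,
        PySem.Dict.insert (s.foldl (fun (acc : Int × PySem.Dict Int Int) i =>
          if x ≠ i ∧ PySem.Int.mod x i = 0 then
            let u := findA s f i acc.2
            (max acc.1 (1 + PySem.Int.floordiv x i * u.1), u.2)
          else acc) (0, dp)).2 x
          (s.foldl (fun (acc : Int × PySem.Dict Int Int) i =>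
          if x ≠ i ∧ PySem.Int.mod x i = 0 then
            let u := findA s f i acc.2
            (max acc.1 (1 + PySem.Int.floordiv x i * u.1), u.2)
          else acc) (0, dp)).1) := by
  simp [findA, h]

theorem foldA_eq {s : List Int} (x : Int) (fuel : Nat) (t : List Int)
    (hrec : ∀ i ∈ t, (x ≠ i ∧ PySem.Int.mod x i = 0) → ∀ dp, okDict s dp →
      (findA s fuel i dp).1 = gval s i ∧ okDict s (findA s fuel i dp).2) :
    ∀ (acc : Int) (dp : PySem.Dict Int Int), okDict s dp →
      (t.foldl (fun (acc : Int × PySem.Dict Int Int) i =>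
          if x ≠ i ∧ PySem.Int.mod x i = 0 then
            let u := findA s fuel i acc.2
            (max acc.1 (1 + PySem.Int.floordiv x i * u.1), u.2)
          else acc) (acc, dp)).1
        = t.foldl (fun a i =>
            if x ≠ i ∧ PySem.Int.mod x i = 0 then
              max a (1 + PySem.Int.floordiv x i * gval s i)
            else a) acc
      ∧ okDict s (t.foldl (fun (acc : Int × PySem.Dict Int Int) i =>
          if x ≠ i ∧ PySem.Int.mod x i = 0 then
            let u := findA s fuel i acc.2
            (max acc.1 (1 + PySem.Int.floordiv x i * u.1), u.2)
          else acc) (acc, dp)).2 := by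
  induction t with
  | nil => intro acc dp hok; exact ⟨rfl, hok⟩
  | cons i t IH =>
    intro acc dp hok
    have hrec' : ∀ j ∈ t, (x ≠ j ∧ PySem.Int.mod x j = 0) → ∀ dp, okDict s dp →
        (findA s fuel j dp).1 = gval s j ∧ okDict s (findA s fuel j dp).2 :=
      fun j hj => hrec j (List.mem_cons_of_mem _ hj)
    by_cases hc : x ≠ i ∧ PySem.Int.mod x i = 0
    · have hstep := hrec i List.mem_cons_self hc dp hok
      simp only [List.foldl_cons, if_pos hc, hstep.1]
      exact IH hrec' _ _ hstep.2
    · simp only [List.foldl_cons, if_neg hc]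
      exact IH hrec' acc dp hok

theorem findA_main {n : Int} {s : List Int} (hs0 : (0 : Int) ∉ s)
    (hsp : ∀ v ∈ s, -v ∈ s → 2 ≤ |v| → ¬ v ∣ n) :
    ∀ a : Nat, ∀ x ∈ s, x ∣ n → x.natAbs = a → ∀ fuel, 2 * a + 2 ≤ fuel →
      ∀ dp, okDict s dp →
        (findA s fuel x dp).1 = gval s x ∧ okDict s (findA s fuel x dp).2 := by
  intro a
  induction a using Nat.strong_induction_on with
  | _ a IH =>
    intro x hx hxn hax fuel hfuel dp hok
    have hx0 : x ≠ 0 := fun h => hs0 (h ▸ hx)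
    have ha : 1 ≤ a := hax ▸ Int.natAbs_pos.2 hx0
    obtain ⟨f, rfl⟩ : ∃ f, fuel = f + 1 := ⟨fuel - 1, by omega⟩
    simp only [findA]
    cases hget : PySem.Dict.get? dp x with
    | some w => exact ⟨hok.2 x w hget, hok⟩
    | none =>
      have hx1 : x ≠ 1 := by rintro rfl; rw [hok.1] at hget; simp at hget
      have hfold := foldA_eq x f s (fun i hi hc dpi hoki => by
        by_cases hi1 : i = 1
        · subst hi1
          rw [findA_one f dpi hoki.1]
          exact ⟨(gval_one s).symm, hoki⟩
        · have hlt := edge_lt hs0 hsp hx hxn hx1 hi hc.1 hc.2 hi1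
          have hin : i ∣ n := dvd_trans ((PySem.Int.mod_eq_zero_iff_dvd x i).1 hc.2) hxn
          exact IH i.natAbs (by omega) i hi hin rfl f (by omega) dpi hoki) 0 dp hok
      constructor
      · rw [hfold.1, ← gval_eq hs0 hsp hx hxn hx1]
      · refine ⟨?_, ?_⟩
        · rw [PySem.Dict.get?_insert_of_ne _ _ (fun h => hx1 h.symm)]
          exact hfold.2.1
        · intro k w hk
          rw [PySem.Dict.get?_insert] at hk
          split_ifs at hk with hkx
          · subst hkx
            rw [hfold.1, ← gval_eq hs0 hsp hx hxn hx1] at hk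
            exact (Option.some_inj.1 hk).symm
          · exact hfold.2.2 k w hk

theorem mem_candB {n v : Int} {s : List Int} :
    v ∈ candB n s ↔ v ∈ s ∧ v ≠ 1 ∧ v ≠ n ∧ PySem.Int.mod n v = 0 := by
  unfold candB
  rw [PySem.List.mem_sorted, List.mem_filter]
  simp [PySem.Set.mem_ofList]

theorem foldB_inv {n : Int} {s : List Int} (hs0 : (0 : Int) ∉ s)
    (hsp : ∀ v ∈ s, -v ∈ s → 2 ≤ |v| → ¬ v ∣ n) :
    ∀ (R P : List Int) (dp : PySem.Dict Int Int),
      candB n s = P ++ R →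
      okDict s dp → (∀ k ∈ P, (dp.get? k).isSome = true) →
      okDict s (R.foldl (fun dp v => dp.insert v (bestB s v dp)) dp) ∧
        ∀ k, k ∈ P ∨ k ∈ R →
          ((R.foldl (fun dp v => dp.insert v (bestB s v dp)) dp).get? k).isSome = true := by
  intro R
  induction R with
  | nil =>
    intro P dp hL hok hcov
    simp only [List.foldl_nil]
    exact ⟨hok, fun k hk => hcov k (by tauto)⟩
  | cons v R IH =>
    intro P dp hL hok hcov
    simp only [List.foldl_cons]
    have hvL : v ∈ candB n s := by rw [hL]; simp
    obtain ⟨hvs, hv1, hvn, hvm⟩ := mem_candB.1 hvL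
    have hvdn : v ∣ n := (PySem.Int.mod_eq_zero_iff_dvd n v).1 hvm
    have hval : bestB s v dp = gval s v := by
      unfold bestB
      rw [gval_eq hs0 hsp hvs hvdn hv1]
      apply PySem.List.foldl_congr_mem'
      intro i hi acc
      by_cases hc : v ≠ i ∧ PySem.Int.mod v i = 0
      · simp only [if_pos hc]
        by_cases hi1 : i = 1
        · subst hi1; rw [hok.1, gval_one]; rfl
        · have hlt := edge_lt hs0 hsp hvs hvdn hv1 hi hc.1 hc.2 hi1
          have hin : i ∣ n := dvd_trans ((PySem.Int.mod_eq_zero_iff_dvd v i).1 hc.2) hvdn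
          have hine : i ≠ n := by
            -- i = n with i ∣ v and v ∣ n would force v = -n, an excluded opposite pair
            intro h2
            have hni : n ∣ v := by rw [← h2]; exact (PySem.Int.mod_eq_zero_iff_dvd v i).1 hc.2
            have hns : n ∈ s := h2 ▸ hi
            have hn0 : n ≠ 0 := fun h => hs0 (h ▸ hns)
            have hv0 : v ≠ 0 := fun h => hs0 (h ▸ hvs)
            have heq : v.natAbs = n.natAbs :=
              le_antisymm (Nat.le_of_dvd (Int.natAbs_pos.2 hn0) (Int.natAbs_dvd_natAbs.2 hvdn))
                (Nat.le_of_dvd (Int.natAbs_pos.2 hv0) (Int.natAbs_dvd_natAbs.2 hni))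
            rcases Int.natAbs_eq_natAbs_iff.1 heq with h' | h'
            · exact hvn h'
            · have hnv : -v ∈ s := by rw [show -v = n by omega]; exact hns
              have hn1 : n ≠ 1 := by rw [← h2]; exact hi1
              have hvm1 : v ≠ -1 := fun hv => hn1 (by omega)
              have hab : 2 ≤ |v| := by rw [Int.abs_eq_natAbs]; omega
              exact absurd hvdn (hsp v hvs hnv hab)
          have hiL : i ∈ candB n s :=
            mem_candB.2 ⟨hi, hi1, hine, (PySem.Int.mod_eq_zero_iff_dvd n i).2 hin⟩
          have hiP : i ∈ P := by
            rw [hL] at hiL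
            rcases List.mem_append.1 hiL with h | h
            · exact h
            · exfalso
              rcases List.mem_cons.1 h with h' | h'
              · exact hc.1 h'.symm
              · -- i after v in the sorted list forces |v| ≤ |i|, contradicting |i| < |v|
                have hp := PySem.List.sorted_pairwise
                  (xs := (PySem.Set.ofList s).filter
                    (fun x => decide (x ≠ 1 ∧ x ≠ n ∧ PySem.Int.mod n x = 0)))
                  (key := fun v : Int => |v|)
                rw [show PySem.List.sorted ((PySem.Set.ofList s).filter
                    (fun x => decide (x ≠ 1 ∧ x ≠ n ∧ PySem.Int.mod n x = 0)))
                    (fun v : Int => |v|) false = candB n s from rfl, hL] at hp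
                have := ((List.pairwise_append.1 hp).2.1)
                have hle : |v| ≤ |i| := (List.pairwise_cons.1 this).1 i h'
                rw [Int.abs_eq_natAbs, Int.abs_eq_natAbs] at hle
                exact absurd hlt (by exact_mod_cast not_lt.2 hle)
          obtain ⟨w, hw⟩ := Option.isSome_iff_exists.1 (hcov i hiP)
          rw [hw]
          have := hok.2 i w hw
          simp [this]
      · simp only [if_neg hc]
    rw [hval]
    have hok' : okDict s (dp.insert v (gval s v)) := by
      refine ⟨?_, ?_⟩
      · rw [PySem.Dict.get?_insert_of_ne _ _ (fun h => hv1 h.symm)]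
        exact hok.1
      · intro k w hk
        rw [PySem.Dict.get?_insert] at hk
        split_ifs at hk with hkv
        · subst hkv; exact (Option.some_inj.1 hk).symm
        · exact hok.2 k w hk
    have hcov' : ∀ k ∈ P ++ [v], ((dp.insert v (gval s v)).get? k).isSome = true := by
      intro k hk
      rw [PySem.Dict.get?_insert]
      split_ifs with hkv
      · rfl
      · rcases List.mem_append.1 hk with h | h
        · exact hcov k h
        · simp only [List.mem_singleton] at h; exact absurd h hkv
    have := IH (P ++ [v]) (dp.insert v (gval s v)) (by simpa using hL) hok' hcov'
    refine ⟨this.1, fun k hk => this.2 k ?_⟩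
    simp only [List.mem_append, List.mem_cons] at *
    tauto

theorem okDict_init (s : List Int) :
    okDict s (PySem.Dict.insert PySem.Dict.empty 1 0) := by
  refine ⟨PySem.Dict.get?_insert_self _ _ _, ?_⟩
  intro k w hk
  rw [PySem.Dict.get?_insert] at hk
  split_ifs at hk with hk1
  · subst hk1
    rw [Option.some_inj.1 hk.symm, gval_one]
  · rw [PySem.Dict.get?_empty] at hk
    simp at hk

theorem natAbs_le_sum {s : List Int} {i : Int} (hi : i ∈ s) :
    i.natAbs ≤ (s.map Int.natAbs).sum :=
  List.single_le_sum (fun x _ => Nat.zero_le x) _ (List.mem_map_of_mem hi)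

-- the degenerate regime 0 ∈ s (inside Pre_: n = 0, s ⊆ {0,1}): both ports reduce to the
-- same pure fold counting whether a 1 occurs
theorem foldA_zero {s : List Int} (t : List Int) (h01 : ∀ i ∈ t, i = 0 ∨ i = 1)
    (fuel : Nat) :
    ∀ (acc : Int) (dp : PySem.Dict Int Int), dp.get? 1 = some 0 →
      (t.foldl (fun (acc : Int × PySem.Dict Int Int) i =>
          if (0 : Int) ≠ i ∧ PySem.Int.mod 0 i = 0 then
            let u := findA s fuel i acc.2
            (max acc.1 (1 + PySem.Int.floordiv 0 i * u.1), u.2)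
          else acc) (acc, dp))
        = (t.foldl (fun a i => if i = 1 then max a 1 else a) acc, dp) := by
  induction t with
  | nil => intro acc dp _; rfl
  | cons i t IH =>
    intro acc dp h1
    have h01' : ∀ j ∈ t, j = 0 ∨ j = 1 := fun j hj => h01 j (List.mem_cons_of_mem _ hj)
    rcases h01 i List.mem_cons_self with rfl | rfl
    · have hcond : ¬((0:Int) ≠ 0 ∧ PySem.Int.mod 0 0 = 0) := by decide
      simp only [List.foldl_cons, if_neg hcond, if_neg (by decide : ¬((0:Int) = 1))]
      exact IH h01' acc dp h1
    · have hcond : ((0:Int) ≠ 1 ∧ PySem.Int.mod 0 1 = 0) := by decide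
      have hstep : (fun (acc : Int × PySem.Dict Int Int) i =>
            if (0:Int) ≠ i ∧ PySem.Int.mod 0 i = 0 then
              let u := findA s fuel i acc.2
              (max acc.1 (1 + PySem.Int.floordiv 0 i * u.1), u.2)
            else acc) (acc, dp) 1 = (max acc 1, dp) := by
        simp only [if_pos hcond, findA_one fuel dp h1]
        norm_num
      rw [List.foldl_cons, List.foldl_cons]
      simp only [if_pos hcond, findA_one fuel dp h1, mul_zero, add_zero]
      exact IH h01' (max acc 1) dp h1

theorem foldB_zero (t : List Int) (h01 : ∀ i ∈ t, i = 0 ∨ i = 1)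
    (dp : PySem.Dict Int Int) (h1 : dp.get? 1 = some 0) :
    ∀ acc : Int,
      t.foldl (fun acc i =>
        if (0 : Int) ≠ i ∧ PySem.Int.mod 0 i = 0 then
          max acc (1 + PySem.Int.floordiv 0 i * (dp.get? i).getD 0)
        else acc) acc
      = t.foldl (fun a i => if i = 1 then max a 1 else a) acc := by
  induction t with
  | nil => intro acc; rfl
  | cons i t IH =>
    intro acc
    have h01' : ∀ j ∈ t, j = 0 ∨ j = 1 := fun j hj => h01 j (List.mem_cons_of_mem _ hj)
    rcases h01 i List.mem_cons_self with rfl | rfl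
    · have hcond : ¬((0:Int) ≠ 0 ∧ PySem.Int.mod 0 0 = 0) := by decide
      simp only [List.foldl_cons, if_neg hcond, if_neg (by decide : ¬((0:Int) = 1))]
      exact IH h01' acc
    · have hcond : ((0:Int) ≠ 1 ∧ PySem.Int.mod 0 1 = 0) := by decide
      have hstep : (fun (acc : Int) i =>
            if (0:Int) ≠ i ∧ PySem.Int.mod 0 i = 0 then
              max acc (1 + PySem.Int.floordiv 0 i * (dp.get? i).getD 0)
            else acc) acc 1 = max acc 1 := by
        simp only [if_pos hcond, h1]
        norm_num
      rw [List.foldl_cons, List.foldl_cons]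
      simp only [if_pos hcond, h1, Option.getD_some, mul_zero, add_zero]
      exact IH h01' (max acc 1)

theorem candB_zero {s : List Int} (h01 : ∀ i ∈ s, i = 0 ∨ i = 1) :
    candB 0 s = [] := by
  unfold candB
  have hf : (PySem.Set.ofList s).filter
      (fun x => decide (x ≠ 1 ∧ x ≠ 0 ∧ PySem.Int.mod 0 x = 0)) = [] := by
    apply List.filter_eq_nil_iff.2
    intro a ha
    rcases h01 a ((PySem.Set.mem_ofList _ _).1 ha) with rfl | rfl <;> simp
  rw [hf]
  exact (PySem.List.sorted_eq_nil_iff _ _ _).2 rfl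

-- ===== VERDICT (by name: the statement is the Claim_ definition above) =====
theorem stoneDivision_spec : Claim_equal_stoneDivision := by
  unfold Claim_equal_stoneDivision
  intro n s _ hpre
  unfold Spec_stoneDivision stoneDivision stoneDivision_alt
  by_cases hn1 : n = 1
  · subst hn1
    rw [findA_one _ _ (PySem.Dict.get?_insert_self _ _ _)]
    simp
  · rcases hpre with h | ⟨hz, hsp⟩
    · exact absurd h hn1
    have hok0 := okDict_init s
    have hmiss : PySem.Dict.get? (PySem.Dict.insert PySem.Dict.empty 1 0 : PySem.Dict Int Int) n = none := by
      rw [PySem.Dict.get?_insert, if_neg hn1]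
      exact PySem.Dict.get?_empty _
    by_cases hs0 : (0 : Int) ∈ s
    · -- degenerate: n = 0, every element of s is 0 or 1
      obtain ⟨rfl, h01⟩ := hz hs0
      rw [show 2 * (s.map Int.natAbs).sum + 4 = (2 * (s.map Int.natAbs).sum + 3) + 1 from rfl,
        findA_miss hmiss]
      simp only [if_neg hn1]
      rw [foldA_zero s h01 (2 * (s.map Int.natAbs).sum + 3) 0
        (PySem.Dict.insert PySem.Dict.empty 1 0) (PySem.Dict.get?_insert_self _ _ _)]
      rw [candB_zero h01]
      simp only [List.foldl_nil]
      unfold bestB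
      rw [foldB_zero s h01 _ (PySem.Dict.get?_insert_self _ _ _) 0]
    · have hsp' : ∀ v ∈ s, -v ∈ s → 2 ≤ |v| → ¬ v ∣ n := hsp
      have hrec : ∀ i ∈ s, (n ≠ i ∧ PySem.Int.mod n i = 0) →
          ∀ dpi, okDict s dpi →
            (findA s (2 * (s.map Int.natAbs).sum + 3) i dpi).1 = gval s i ∧
              okDict s (findA s (2 * (s.map Int.natAbs).sum + 3) i dpi).2 := by
        intro i hi hc dpi hoki
        by_cases hi1 : i = 1
        · subst hi1
          rw [findA_one _ dpi hoki.1]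
          exact ⟨(gval_one s).symm, hoki⟩
        · have hin : i ∣ n := (PySem.Int.mod_eq_zero_iff_dvd n i).1 hc.2
          exact findA_main hs0 hsp' i.natAbs i hi hin rfl _
            (by have := natAbs_le_sum hi; omega) dpi hoki
      have hA : (findA s (2 * (s.map Int.natAbs).sum + 4) n
          (PySem.Dict.insert PySem.Dict.empty 1 0)).1
          = s.foldl (fun a i =>
              if n ≠ i ∧ PySem.Int.mod n i = 0 then
                max a (1 + PySem.Int.floordiv n i * gval s i)
              else a) 0 := by
        rw [show 2 * (s.map Int.natAbs).sum + 4 = (2 * (s.map Int.natAbs).sum + 3) + 1 from rfl,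
          findA_miss hmiss]
        exact (foldA_eq n (2 * (s.map Int.natAbs).sum + 3) s hrec 0 _ hok0).1
      have hB := foldB_inv hs0 hsp' (candB n s) [] _ rfl hok0 (by simp)
      unfold bestB at hB
      rw [hA, if_neg hn1]
      apply Eq.symm
      unfold bestB
      apply PySem.List.foldl_congr_mem'
      intro i hi acc
      by_cases hc : n ≠ i ∧ PySem.Int.mod n i = 0
      · simp only [if_pos hc]
        by_cases hi1 : i = 1
        · subst hi1
          rw [hB.1.1, gval_one]; rfl
        · have hiL : i ∈ candB n s := mem_candB.2 ⟨hi, hi1, fun h => hc.1 h.symm, hc.2⟩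
          obtain ⟨w, hw⟩ := Option.isSome_iff_exists.1 (hB.2 i (Or.inr hiL))
          rw [hw]
          have := hB.1.2 i w hw
          simp [this]
      · simp only [if_neg hc]
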